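/- GENERATED by c/gen_decode.py: decode facts of the image, one per distinct instruction byte string. -/
import UserX.DecodeImage

#decode_all ProgX.Base.Dec
  "4157"  -- push r15
  "4881fde0ff3f00"  -- cmp rbp,0x3fffe0
  "4889742408"  -- mov QWORD PTR [rsp+0x8],rsi
  "488b142510f01f00"  -- mov rdx,QWORD PTR ds:0x1ff010
  "490fafc5"  -- imul rax,r13
  "4c01f5"  -- add rbp,r14
  "660f28c5"  -- movapd xmm0,xmm5
  "66480f6ec7"  -- movq xmm0,rdi
  "746f"  -- je 103b81
  "7801"  -- js 1016e7
  "85c0"  -- test eax,eax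
  "bf00000000"  -- mov edi,0x0
  "e876f6ffff"  -- call 102440
  "e8e4bdffff"  -- call 100059
  "ebb8"  -- jmp 103b73
  "f20f102c24"  -- movsd xmm5,QWORD PTR [rsp]
  "f20f5905b7d70300"  -- mulsd xmm0,QWORD PTR [rip+0x3d7b7]
  "f20f5ce3"  -- subsd xmm4,xmm3
  "f6c207"  -- test dl,0x7
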